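-- pv_equiv track=rewrite | github.com/zhuangziGiantfish/Unable-to-Forget | core/analysis_helper.py | extract_one_session_response_pos_in_stream
-- ===== SOURCE A (Python) =====
-- def get_response_pos_in_stream(dict_stream_updates,dict_response):
--     """
--     Get the response positions in the stream.
--     The order of the keys are determined by the order of the keys in dict_stream_updates.
--     """
--     if dict_response is None:
--         dict_response = {}
--     list_pos = []
--     list_keys = []
--     for key, value in dict_stream_updates.items():
--         if key in dict_response:
--             try:
--                 list_pos.append(value.index(dict_response[key]))
--             except ValueError:
--                 ## The answer is not in the stream (out of set answer)
--                 list_pos.append(-1)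
--         else:
--             ## not answered key
--             list_pos.append(-2)
--         list_keys.append(key)
--     return list_pos,list_keys
--
-- def extract_one_session_response_pos_in_stream(dict_stream_updates,dict_response,lst_keys_tomark):
--
--     if dict_response is None:
--         ## no response, return empty lists
--         return [],[]
--
--     lst_pos,lst_keys = get_response_pos_in_stream(dict_stream_updates,dict_response)
--
--     if lst_keys_tomark:
--         lst_pos_marked = []
--         lst_pos_notmarked = []
--
--         ## separate the lst_pos into list_all_pos_marked and list_all_pos_notmarked
--         ## by whether the key is in list_dict_keys_tomark
--         for key,pos in zip(lst_keys,lst_pos):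
--             if key in lst_keys_tomark:
--                 lst_pos_marked.append(pos)
--             else:
--                 lst_pos_notmarked.append(pos)
--     else:
--         ## simplify the computation
--         lst_pos_marked = lst_pos
--         lst_pos_notmarked = []
--
--     return lst_pos_marked,lst_pos_notmarked
-- ===== SOURCE B (Python) =====
-- def extract_one_session_response_pos_in_stream(dict_stream_updates, dict_response, lst_keys_tomark):
--     if dict_response is None:
--         ## no response, return empty lists
--         return [], []
--     lst_pos_marked = []
--     lst_pos_notmarked = []
--     ## one fused pass: compute each position and route it immediately,
--     ## never materialising the intermediate pos/keys lists
--     for key, value in dict_stream_updates.items():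
--         if key in dict_response:
--             try:
--                 pos = value.index(dict_response[key])
--             except ValueError:
--                 ## the answer is not in the stream
--                 pos = -1
--         else:
--             ## not answered key
--             pos = -2
--         if not lst_keys_tomark or key in lst_keys_tomark:
--             lst_pos_marked.append(pos)
--         else:
--             lst_pos_notmarked.append(pos)
--     return lst_pos_marked, lst_pos_notmarked
-- ===== Notes on version B (the rewrite author's own statement) =====
-- stated objective: simpler
-- what changed: Inlines the helper and fuses its position-building loop with the partition loop into a single pass that routes each position directly, eliminating the intermediate lst_pos/lst_keys lists and the second zip scan.
import Mathlib
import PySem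

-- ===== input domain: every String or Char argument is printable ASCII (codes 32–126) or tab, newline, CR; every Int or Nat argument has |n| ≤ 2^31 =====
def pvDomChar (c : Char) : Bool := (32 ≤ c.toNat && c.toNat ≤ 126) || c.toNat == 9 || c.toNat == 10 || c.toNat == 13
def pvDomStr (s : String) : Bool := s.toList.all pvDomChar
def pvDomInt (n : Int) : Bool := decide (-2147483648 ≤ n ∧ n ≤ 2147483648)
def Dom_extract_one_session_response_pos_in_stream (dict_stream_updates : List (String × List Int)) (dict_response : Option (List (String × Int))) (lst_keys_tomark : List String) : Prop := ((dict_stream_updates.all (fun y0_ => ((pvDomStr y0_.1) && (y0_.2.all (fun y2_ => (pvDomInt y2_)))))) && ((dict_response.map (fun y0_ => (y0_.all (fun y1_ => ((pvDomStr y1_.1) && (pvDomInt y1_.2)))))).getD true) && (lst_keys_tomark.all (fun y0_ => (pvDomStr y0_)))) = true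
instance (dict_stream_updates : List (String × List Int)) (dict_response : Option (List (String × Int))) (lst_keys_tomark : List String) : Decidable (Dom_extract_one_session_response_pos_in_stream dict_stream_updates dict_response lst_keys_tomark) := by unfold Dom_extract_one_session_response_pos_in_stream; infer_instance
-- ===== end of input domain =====

-- ===== PORT A =====
-- B fuses A's two loops into one pass; same return value everywhere (header objective: simpler).
-- helper: transliteration of get_response_pos_in_stream (dict_response already non-None here)
def get_response_pos_in_stream (dict_stream_updates : List (String × List Int)) (dict_response : List (String × Int)) : List Int × List String :=
  dict_stream_updates.foldl (fun (acc : List Int × List String) kv =>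
    let pos : Int :=
      match PySem.Dict.get? (PySem.Dict.mk dict_response) kv.1 with
      | none => -2
      | some t =>
        match PySem.List.index? kv.2 t with
        | none => -1
        | some i => (i : Int)
    (acc.1 ++ [pos], acc.2 ++ [kv.1])) ([], [])

def extract_one_session_response_pos_in_stream (dict_stream_updates : List (String × List Int)) (dict_response : Option (List (String × Int))) (lst_keys_tomark : List String) : List Int × List Int :=
  match dict_response with
  | none => ([], [])
  | some dr =>
    let lp := get_response_pos_in_stream dict_stream_updates dr
    if lst_keys_tomark.isEmpty = false then
      (lp.2.zip lp.1).foldl (fun (acc : List Int × List Int) kp =>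
        if lst_keys_tomark.contains kp.1 then (acc.1 ++ [kp.2], acc.2)
        else (acc.1, acc.2 ++ [kp.2])) ([], [])
    else
      (lp.1, [])

-- ===== PORT B =====
def extract_one_session_response_pos_in_stream_alt (dict_stream_updates : List (String × List Int)) (dict_response : Option (List (String × Int))) (lst_keys_tomark : List String) : List Int × List Int :=
  match dict_response with
  | none => ([], [])
  | some dr =>
    dict_stream_updates.foldl (fun (acc : List Int × List Int) kv =>
      let pos : Int :=
        match PySem.Dict.get? (PySem.Dict.mk dr) kv.1 with
        | none => -2
        | some t =>
          match PySem.List.index? kv.2 t with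
          | none => -1
          | some i => (i : Int)
      if lst_keys_tomark.isEmpty || lst_keys_tomark.contains kv.1 then
        (acc.1 ++ [pos], acc.2)
      else
        (acc.1, acc.2 ++ [pos])) ([], [])

-- ===== PRECONDITION & SPEC =====
def Spec_extract_one_session_response_pos_in_stream (dict_stream_updates : List (String × List Int)) (dict_response : Option (List (String × Int))) (lst_keys_tomark : List String) (out : List Int × List Int) : Prop := out = extract_one_session_response_pos_in_stream_alt dict_stream_updates dict_response lst_keys_tomark
instance (dict_stream_updates : List (String × List Int)) (dict_response : Option (List (String × Int))) (lst_keys_tomark : List String) (out : List Int × List Int) : Decidable (Spec_extract_one_session_response_pos_in_stream dict_stream_updates dict_response lst_keys_tomark out) := by unfold Spec_extract_one_session_response_pos_in_stream; infer_instance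

-- ===== CLAIM =====
def Claim_equal_extract_one_session_response_pos_in_stream : Prop := ∀ (dict_stream_updates : List (String × List Int)) (dict_response : Option (List (String × Int))) (lst_keys_tomark : List String), Dom_extract_one_session_response_pos_in_stream dict_stream_updates dict_response lst_keys_tomark → Spec_extract_one_session_response_pos_in_stream dict_stream_updates dict_response lst_keys_tomark (extract_one_session_response_pos_in_stream dict_stream_updates dict_response lst_keys_tomark)

-- ===== LEMMAS AND PROOFS =====
-- the position value both programs compute for one (key, value) entry
def pvPosOf (dr : List (String × Int)) (kv : String × List Int) : Int :=
  match PySem.Dict.get? (PySem.Dict.mk dr) kv.1 with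
  | none => -2
  | some t =>
    match PySem.List.index? kv.2 t with
    | none => -1
    | some i => (i : Int)

theorem get_response_pos_eq (l : List (String × List Int)) (dr : List (String × Int)) (a : List Int) (ks : List String) :
    l.foldl (fun (acc : List Int × List String) kv =>
      (acc.1 ++ [pvPosOf dr kv], acc.2 ++ [kv.1])) (a, ks) =
    (a ++ l.map (pvPosOf dr), ks ++ l.map Prod.fst) := by
  induction l generalizing a ks with
  | nil => simp
  | cons kv l ih => simp [ih]

theorem foldl_push_fst (l : List (String × List Int)) (f : String × List Int → Int) (a b : List Int) :
    l.foldl (fun (acc : List Int × List Int) kv => (acc.1 ++ [f kv], acc.2)) (a, b) =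
    (a ++ l.map f, b) := by
  induction l generalizing a with
  | nil => simp
  | cons kv l ih => simp [ih]

-- ===== VERDICT =====
theorem extract_one_session_response_pos_in_stream_spec : Claim_equal_extract_one_session_response_pos_in_stream := by
  intro l dro tm _
  unfold Spec_extract_one_session_response_pos_in_stream
  unfold extract_one_session_response_pos_in_stream extract_one_session_response_pos_in_stream_alt get_response_pos_in_stream
  cases dro with
  | none => rfl
  | some dr =>
    simp only []
    rw [show (fun (acc : List Int × List String) (kv : String × List Int) =>
          (acc.1 ++ [match PySem.Dict.get? (PySem.Dict.mk dr) kv.1 with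
            | none => -2
            | some t => match PySem.List.index? kv.2 t with
              | none => -1
              | some i => (i : Int)], acc.2 ++ [kv.1]))
        = (fun (acc : List Int × List String) kv => (acc.1 ++ [pvPosOf dr kv], acc.2 ++ [kv.1])) from rfl,
      show (fun (acc : List Int × List Int) (kv : String × List Int) =>
          (if tm.isEmpty || tm.contains kv.1 then
            (acc.1 ++ [match PySem.Dict.get? (PySem.Dict.mk dr) kv.1 with
              | none => -2
              | some t => match PySem.List.index? kv.2 t with
                | none => -1
                | some i => (i : Int)], acc.2)
          else
            (acc.1, acc.2 ++ [match PySem.Dict.get? (PySem.Dict.mk dr) kv.1 with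
              | none => -2
              | some t => match PySem.List.index? kv.2 t with
                | none => -1
                | some i => (i : Int)])))
        = (fun (acc : List Int × List Int) kv =>
            if tm.isEmpty || tm.contains kv.1 then (acc.1 ++ [pvPosOf dr kv], acc.2)
            else (acc.1, acc.2 ++ [pvPosOf dr kv])) from rfl,
      get_response_pos_eq l dr [] []]
    cases htm : tm.isEmpty with
    | true =>
      have : tm = [] := List.isEmpty_iff.mp htm
      subst this
      simp only [List.contains_nil, Bool.true_or, if_true]
      rw [foldl_push_fst l (pvPosOf dr) [] []]
      simp
    | false =>
      simp only [Bool.false_or, List.nil_append, if_true]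
      rw [List.zip_map', List.foldl_map]
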